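-- pv_equiv track=rewrite | github.com/PaulGilmartin/hackerrank | Algorithms/Dynamic_Programming/Fibonacci.py | memoized_fib
-- ===== SOURCE A (Python) =====
-- def memoized_fib(num, memo_dict):
--     if num in memo_dict:
--         return memo_dict[num]
--     else:
--         sum1 = memoized_fib(num - 1, memo_dict)**2
--         sum2 = memoized_fib(num - 2, memo_dict)
--         memo_dict[num] = sum1 + sum2
--         return sum1 + sum2
-- ===== SOURCE B (Python) =====
-- def memoized_fib(num, memo_dict):
--     if num in memo_dict:
--         return memo_dict[num]
--     start = max(k for k in memo_dict if k < num and k - 1 in memo_dict)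
--     for i in range(start + 1, num + 1):
--         if i not in memo_dict:
--             memo_dict[i] = memo_dict[i - 1] ** 2 + memo_dict[i - 2]
--     return memo_dict[num]
-- ===== Notes on version B (the rewrite author's own statement) =====
-- stated objective: alternative
-- what changed: Top-down memoized recursion is replaced by an iterative bottom-up fill: find the highest key m below num whose predecessor m-1 is also present, then loop upward from m+1 to num filling each missing entry from the two below it.
import Mathlib
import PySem

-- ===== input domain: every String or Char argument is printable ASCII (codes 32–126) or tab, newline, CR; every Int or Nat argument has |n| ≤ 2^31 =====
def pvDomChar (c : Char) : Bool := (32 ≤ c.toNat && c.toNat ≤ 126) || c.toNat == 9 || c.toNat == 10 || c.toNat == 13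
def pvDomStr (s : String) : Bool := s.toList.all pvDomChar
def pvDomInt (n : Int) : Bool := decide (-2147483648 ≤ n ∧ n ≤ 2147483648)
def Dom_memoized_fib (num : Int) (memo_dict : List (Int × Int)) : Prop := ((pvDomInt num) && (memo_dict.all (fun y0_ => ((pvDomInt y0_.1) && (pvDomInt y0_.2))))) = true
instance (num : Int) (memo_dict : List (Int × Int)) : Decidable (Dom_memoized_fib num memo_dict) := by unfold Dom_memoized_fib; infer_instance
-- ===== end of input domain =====

-- B replaces A's top-down memoized recursion with an iterative bottom-up fill (alternative
-- decomposition, no speed claim). Both Pythons mutate memo_dict (same keys, same values);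
-- the equivalence proved here is about the return value only.

-- ===== PORT A =====
-- fuel-indexed transliteration of A's unbounded recursion; the fuel is exhausted only on
-- inputs where the Python recursion never terminates (RecursionError), excluded by Pre_.
def memoized_fibGo : Nat → Int → PySem.Dict Int Int → Int × PySem.Dict Int Int
  | fuel, num, d =>
    match d.get? num with
    | some v => (v, d)
    | none =>
      match fuel with
      | 0 => (0, d)
      | f + 1 =>
        let r1 := memoized_fibGo f (num - 1) d
        let r2 := memoized_fibGo f (num - 2) r1.2
        (r1.1 ^ 2 + r2.1, r2.2.insert num (r1.1 ^ 2 + r2.1))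

def memoized_fib (num : Int) (memo_dict : List (Int × Int)) : Int :=
  (memoized_fibGo (num + 2147483650).toNat num (PySem.Dict.mk memo_dict)).1

-- ===== PORT B =====
def memoized_fib_alt (num : Int) (memo_dict : List (Int × Int)) : Int :=
  let d := PySem.Dict.mk memo_dict
  match d.get? num with
  | some v => v
  | none =>
    match PySem.List.max? (d.keys.filter (fun k => decide (k < num) && d.contains (k - 1))) (fun x => x) with
    | none => 0   -- Python: max() of an empty generator raises ValueError; excluded by Pre_
    | some start =>
      let d2 := (PySem.List.pyRange (start + 1) (num + 1)).foldl
        (fun dd i => if dd.contains i then dd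
                     else dd.insert i ((dd.getD (i - 1) 0) ^ 2 + dd.getD (i - 2) 0)) d
      d2.getD num 0

-- ===== PRECONDITION & SPEC =====
-- Pre_ excludes exactly the inputs on which A's unbounded recursion never reaches a memoized
-- base (Python raises RecursionError there): num absent and no key m < num with m-1 also a
-- key. B also raises on those inputs (ValueError/KeyError).
def Pre_memoized_fib (num : Int) (memo_dict : List (Int × Int)) : Prop :=
  num ∈ memo_dict.map Prod.fst ∨
  ∃ m ∈ memo_dict.map Prod.fst, m < num ∧ (m - 1) ∈ memo_dict.map Prod.fst

instance (num : Int) (memo_dict : List (Int × Int)) : Decidable (Pre_memoized_fib num memo_dict) := by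
  unfold Pre_memoized_fib; infer_instance

def pvWitness_memoized_fib : Int × (List (Int × Int)) := (3, [(0, 0), (1, 1)])

def Spec_memoized_fib (num : Int) (memo_dict : List (Int × Int)) (out : Int) : Prop := out = memoized_fib_alt num memo_dict
instance (num : Int) (memo_dict : List (Int × Int)) (out : Int) : Decidable (Spec_memoized_fib num memo_dict out) := by unfold Spec_memoized_fib; infer_instance

-- ===== CLAIM (what is proved, stated in full; the proofs are below) =====
def Claim_equal_memoized_fib : Prop := ∀ (num : Int) (memo_dict : List (Int × Int)), Dom_memoized_fib num memo_dict → Pre_memoized_fib num memo_dict → Spec_memoized_fib num memo_dict (memoized_fib num memo_dict)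

-- ===== LEMMAS AND PROOFS =====

-- pvFp d m k = (filled value at m+k-1, filled value at m+k): the dict's own value at keys of
-- d, otherwise previous² + the one before.
def pvFp (d : PySem.Dict Int Int) (m : Int) : Nat → Int × Int
  | 0 => (d.getD (m - 1) 0, d.getD m 0)
  | k + 1 =>
    let p := pvFp d m k
    (p.2, if d.contains (m + 1 + (k : Int)) then d.getD (m + 1 + (k : Int)) 0 else p.2 ^ 2 + p.1)

-- pvFill d m k = d with every key in (m, m+k] missing from d inserted with its filled value.
def pvFill (d : PySem.Dict Int Int) (m : Int) : Nat → PySem.Dict Int Int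
  | 0 => d
  | k + 1 =>
    if d.contains (m + 1 + (k : Int)) then pvFill d m k
    else (pvFill d m k).insert (m + 1 + (k : Int)) (pvFp d m (k + 1)).2

theorem pvFill_get?_low (d : PySem.Dict Int Int) (m : Int) (k : Nat) (x : Int) (hx : x < m + 1) :
    (pvFill d m k).get? x = d.get? x := by
  induction k with
  | zero => rfl
  | succ k ih =>
    unfold pvFill
    split
    · exact ih
    · rw [PySem.Dict.get?_insert_of_ne _ _ (by omega : x ≠ m + 1 + (k : Int))]; exact ih

theorem pvFill_get?_high (d : PySem.Dict Int Int) (m : Int) (k : Nat) (x : Int)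
    (hx : m + (k : Int) < x) : (pvFill d m k).get? x = d.get? x := by
  induction k with
  | zero => rfl
  | succ k ih =>
    have hk : m + (k : Int) < x := by push_cast at hx ⊢; omega
    unfold pvFill
    split
    · exact ih hk
    · rw [PySem.Dict.get?_insert_of_ne _ _ (by push_cast at hx; omega : x ≠ m + 1 + (k : Int))]
      exact ih hk

theorem pv_contains_get? (d : PySem.Dict Int Int) (x : Int) (h : d.contains x = true) :
    d.get? x = some (d.getD x 0) := by
  rw [PySem.Dict.contains_eq_isSome_get?] at h
  cases hg : d.get? x with
  | none => rw [hg] at h; simp at h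
  | some v => rw [PySem.Dict.getD_of_get?_eq_some _ _ hg]

theorem pvFill_get? (d : PySem.Dict Int Int) (m : Int) (hm : d.contains m = true)
    (k : Nat) : ∀ j : Nat, j ≤ k → (pvFill d m k).get? (m + (j : Int)) = some (pvFp d m j).2 := by
  induction k with
  | zero =>
    intro j hj
    interval_cases j
    simpa [pvFill, pvFp] using pv_contains_get? d m hm
  | succ k ih =>
    intro j hj
    rcases Nat.lt_or_ge j (k + 1) with hlt | hge
    · have hj' : j ≤ k := by omega
      unfold pvFill
      split
      · exact ih j hj'
      · rw [PySem.Dict.get?_insert_of_ne _ _ (by omega : m + (j : Int) ≠ m + 1 + (k : Int))]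
        exact ih j hj'
    · have hje : j = k + 1 := by omega
      subst hje
      have hx : m + (((k : Nat) + 1 : Nat) : Int) = m + 1 + (k : Int) := by push_cast; ring
      unfold pvFill
      split
      · rename_i hc
        rw [hx, pvFill_get?_high d m k _ (by omega), pv_contains_get? d _ hc]
        unfold pvFp
        simp [hc]
      · rename_i hc
        rw [hx, PySem.Dict.get?_insert_self]

theorem pvFill_get?_base (d : PySem.Dict Int Int) (m : Int) (hm1 : d.contains (m - 1) = true)
    (k : Nat) : (pvFill d m k).get? (m - 1) = some (pvFp d m 0).1 := by
  rw [pvFill_get?_low d m k _ (by omega), pv_contains_get? d _ hm1]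
  rfl

theorem pvFp_fst (d : PySem.Dict Int Int) (m : Int) (k : Nat) :
    (pvFp d m (k + 1)).1 = (pvFp d m k).2 := rfl

-- invariant maintained by A's recursion: d' agrees with d on d's keys, and any extra key x
-- of d' lies above m and carries the filled value.
def pvInv (d d' : PySem.Dict Int Int) (m : Int) : Prop :=
  (∀ x : Int, d.contains x = true → d'.get? x = d.get? x) ∧
  (∀ x : Int, d.contains x = false → ∀ v : Int, d'.get? x = some v →
      m + 1 ≤ x ∧ v = (pvFp d m (x - m).toNat).2)

-- the filled value at position n (for n ≥ m - 1)
def pvVal (d : PySem.Dict Int Int) (m n : Int) : Int :=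
  if n < m then d.getD n 0 else (pvFp d m (n - m).toNat).2

theorem pvVal_contains (d : PySem.Dict Int Int) (m n : Int) (hn : m - 1 ≤ n)
    (hc : d.contains n = true) : pvVal d m n = d.getD n 0 := by
  unfold pvVal
  split
  · rfl
  · rename_i h
    rcases (by omega : n = m ∨ m + 1 ≤ n) with h0 | h0
    · subst h0; simp [pvFp]
    · have hk : (n - m).toNat = (n - m - 1).toNat + 1 := by omega
      rw [hk]
      unfold pvFp
      have hx : m + 1 + ((n - m - 1).toNat : Int) = n := by omega
      rw [hx]
      simp [hc]

theorem pvFp_succ (d : PySem.Dict Int Int) (m : Int) (k : Nat) :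
    (pvFp d m (k + 1)).2 =
      if d.contains (m + 1 + (k : Int)) = true then d.getD (m + 1 + (k : Int)) 0
      else (pvFp d m k).2 ^ 2 + (pvFp d m k).1 := rfl

theorem pvVal_rec (d : PySem.Dict Int Int) (m n : Int) (hn : m + 1 ≤ n)
    (hc : d.contains n = false) : pvVal d m n = (pvVal d m (n - 1)) ^ 2 + pvVal d m (n - 2) := by
  have hk : (n - m).toNat = (n - m - 1).toNat + 1 := by omega
  have hx : m + 1 + ((n - m - 1).toNat : Int) = n := by omega
  have he1 : (n - 1 - m).toNat = (n - m - 1).toNat := by omega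
  unfold pvVal
  rw [if_neg (by omega : ¬ (n < m)), if_neg (by omega : ¬ (n - 1 < m)), hk, pvFp_succ, hx,
    if_neg (by simp [hc]), he1]
  congr 1
  rcases Nat.eq_zero_or_pos (n - m - 1).toNat with h0 | h0
  · -- n = m + 1 : the second summand is d's value at m - 1
    rw [if_pos (by omega : n - 2 < m), h0]
    have hy : n - 2 = m - 1 := by omega
    rw [hy]
    rfl
  · rw [if_neg (by omega : ¬ (n - 2 < m))]
    have hk2 : (n - m - 1).toNat = (n - 2 - m).toNat + 1 := by omega
    rw [hk2, pvFp_fst]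

theorem pvGoA (d : PySem.Dict Int Int) (m : Int) (hm : d.contains m = true)
    (hm1 : d.contains (m - 1) = true) :
    ∀ fuel : Nat, ∀ n : Int, ∀ d' : PySem.Dict Int Int, pvInv d d' m → m - 1 ≤ n →
      (n - m).toNat < fuel →
      (memoized_fibGo fuel n d').1 = pvVal d m n ∧ pvInv d (memoized_fibGo fuel n d').2 m := by
  intro fuel
  induction fuel with
  | zero => intro n d' _ _ hf; omega
  | succ f ih =>
    intro n d' hI hn hf
    rw [memoized_fibGo]
    cases hg : d'.get? n with
    | some v =>
      simp only
      constructor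
      · by_cases hc : d.contains n = true
        · rw [pvVal_contains d m n hn hc]
          have h := (hI.1 n hc).symm.trans hg
          rw [pv_contains_get? d n hc] at h
          exact (Option.some_injective _ h).symm
        · have h2 := hI.2 n (by simpa using hc) v hg
          unfold pvVal
          rw [if_neg (by omega)]
          exact h2.2
      · exact hI
    | none =>
      -- n is not a key of d, hence n ≥ m + 1
      have hcn : d.contains n = false := by
        by_contra hc
        have hc' : d.contains n = true := by simpa using hc
        have h := (hI.1 n hc').symm.trans hg
        rw [pv_contains_get? d n hc'] at h
        simp at h
      have hnm : m + 1 ≤ n := by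
        rcases (by omega : n = m - 1 ∨ n = m ∨ m + 1 ≤ n) with h | h | h
        · rw [h] at hcn; rw [hm1] at hcn; exact Bool.noConfusion hcn
        · rw [h] at hcn; rw [hm] at hcn; exact Bool.noConfusion hcn
        · exact h
      simp only
      have h1 := ih (n - 1) d' hI (by omega) (by omega)
      have h2 := ih (n - 2) (memoized_fibGo f (n - 1) d').2 h1.2 (by omega) (by omega)
      refine ⟨?_, ?_, ?_⟩
      · rw [h1.1, h2.1, pvVal_rec d m n hnm hcn]
      · intro x hc
        have hxn : x ≠ n := fun he => by rw [he] at hc; rw [hc] at hcn; exact Bool.noConfusion hcn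
        rw [PySem.Dict.get?_insert_of_ne _ _ hxn]
        exact h2.2.1 x hc
      · intro x hc v hv
        by_cases hx : x = n
        · subst hx
          rw [PySem.Dict.get?_insert_self] at hv
          refine ⟨hnm, ?_⟩
          have hv' : v = (memoized_fibGo f (x - 1) d').1 ^ 2 + (memoized_fibGo f (x - 2) (memoized_fibGo f (x - 1) d').2).1 :=
            (Option.some_injective _ hv).symm
          rw [hv', h1.1, h2.1, ← pvVal_rec d m x hnm hcn]
          unfold pvVal
          rw [if_neg (by omega)]
        · rw [PySem.Dict.get?_insert_of_ne _ _ hx] at hv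
          exact h2.2.2 x hc v hv

-- B's loop computes pvFill
theorem pvFoldB (d : PySem.Dict Int Int) (m : Int) (hm : d.contains m = true)
    (hm1 : d.contains (m - 1) = true) :
    ∀ k : Nat,
      (PySem.List.pyRange (m + 1) (m + 1 + (k : Int))).foldl
        (fun dd i => if dd.contains i then dd
                     else dd.insert i ((dd.getD (i - 1) 0) ^ 2 + dd.getD (i - 2) 0)) d
      = pvFill d m k := by
  intro k
  induction k with
  | zero => rw [show m + 1 + ((0 : Nat) : Int) = m + 1 by push_cast; ring,
      PySem.List.pyRange_one_eq_nil (by omega)]; rfl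
  | succ k ih =>
    have hsplit : m + 1 + (((k : Nat) + 1 : Nat) : Int) = (m + 1 + (k : Int)) + 1 := by push_cast; ring
    rw [hsplit, PySem.List.pyRange_one_succ_right (by omega), List.foldl_append, ih]
    simp only [List.foldl_cons, List.foldl_nil]
    have hcc : (pvFill d m k).contains (m + 1 + (k : Int)) = d.contains (m + 1 + (k : Int)) := by
      rw [PySem.Dict.contains_eq_isSome_get?, PySem.Dict.contains_eq_isSome_get?,
        pvFill_get?_high d m k _ (by omega)]
    conv_rhs => rw [pvFill]
    rw [hcc]
    by_cases hc : d.contains (m + 1 + (k : Int)) = true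
    · rw [hc]; simp
    · have hc' : d.contains (m + 1 + (k : Int)) = false := by simpa using hc
      rw [hc']
      simp only [Bool.false_eq_true, if_false]
      have g1 : (pvFill d m k).getD (m + 1 + (k : Int) - 1) 0 = (pvFp d m k).2 := by
        rw [show m + 1 + (k : Int) - 1 = m + (k : Int) by ring]
        exact PySem.Dict.getD_of_get?_eq_some _ _ (pvFill_get? d m hm k k le_rfl)
      have g2 : (pvFill d m k).getD (m + 1 + (k : Int) - 2) 0 = (pvFp d m k).1 := by
        rcases Nat.eq_zero_or_pos k with h0 | h0
        · subst h0
          rw [show m + 1 + ((0 : Nat) : Int) - 2 = m - 1 by push_cast; ring]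
          exact PySem.Dict.getD_of_get?_eq_some _ _ (pvFill_get?_base d m hm1 0)
        · have hk2 : k = (k - 1) + 1 := by omega
          rw [show m + 1 + (k : Int) - 2 = m + ((k - 1 : Nat) : Int) by omega]
          rw [PySem.Dict.getD_of_get?_eq_some _ _ (pvFill_get? d m hm k (k - 1) (by omega))]
          conv_rhs => rw [hk2]
          rw [pvFp_fst]
      rw [g1, g2]
      congr 1
      conv_rhs => rw [pvFp]
      rw [if_neg (by simp [hc'])]

theorem pv_go_hit (fuel : Nat) (n : Int) (d : PySem.Dict Int Int) (v : Int)
    (hg : d.get? n = some v) : memoized_fibGo fuel n d = (v, d) := by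
  cases fuel with
  | zero => rw [memoized_fibGo]; rw [hg]
  | succ f => rw [memoized_fibGo]; rw [hg]

theorem pv_main (num : Int) (memo_dict : List (Int × Int)) (hdom : Dom_memoized_fib num memo_dict)
    (hpre : Pre_memoized_fib num memo_dict) :
    memoized_fib num memo_dict = memoized_fib_alt num memo_dict := by
  unfold memoized_fib memoized_fib_alt
  set d := PySem.Dict.mk memo_dict with hd
  cases hg : d.get? num with
  | some v =>
    rw [pv_go_hit _ _ _ _ hg]
    simp only [hg]
  | none =>
    simp only
    -- num is not a key
    have hnk : num ∉ memo_dict.map Prod.fst := by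
      have h := (PySem.Dict.get?_eq_none_iff_not_mem_keys d num).mp hg
      simpa [hd, PySem.Dict.keys_mk] using h
    rcases hpre with h | ⟨p, hpmem, hplt, hp1⟩
    · exact absurd h hnk
    -- the filtered key list is nonempty, so max? returns some m
    have hpk : p ∈ d.keys := by simpa [hd, PySem.Dict.keys_mk] using hpmem
    have hp1c : d.contains (p - 1) = true :=
      (PySem.Dict.contains_iff_mem_keys d (p - 1)).mpr (by simpa [hd, PySem.Dict.keys_mk] using hp1)
    have hpfil : p ∈ d.keys.filter (fun k => decide (k < num) && d.contains (k - 1)) := by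
      rw [List.mem_filter]
      exact ⟨hpk, by simp [hplt, hp1c]⟩
    cases hmax : PySem.List.max? (d.keys.filter (fun k => decide (k < num) && d.contains (k - 1))) (fun x => x) with
    | none =>
      rw [PySem.List.max?_eq_none_iff] at hmax
      rw [hmax] at hpfil
      exact absurd hpfil List.not_mem_nil
    | some m =>
      simp only [hg]
      have hmfil := PySem.List.max?_mem hmax
      rw [List.mem_filter] at hmfil
      have hmp := hmfil.2
      simp only [Bool.and_eq_true, decide_eq_true_eq] at hmp
      have hmlt : m < num := hmp.1
      have hm1c : d.contains (m - 1) = true := hmp.2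
      have hmc : d.contains m = true := (PySem.Dict.contains_iff_mem_keys d m).mpr hmfil.1
      -- lower bound on m from Dom
      have hmlow : -2147483648 ≤ m := by
        unfold Dom_memoized_fib at hdom
        simp only [Bool.and_eq_true, List.all_eq_true] at hdom
        have hmk' : m ∈ memo_dict.map Prod.fst := by
          simpa [hd, PySem.Dict.keys_mk] using hmfil.1
        rw [List.mem_map] at hmk'
        obtain ⟨q, hq, hq1⟩ := hmk'
        have hqd := hdom.2 q hq
        simp only [pvDomInt, decide_eq_true_eq] at hqd
        omega
      -- A's side
      have hI : pvInv d d m :=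
        ⟨fun _ _ => rfl, fun x hc v hv => by
          rw [PySem.Dict.contains_eq_isSome_get?, hv] at hc; exact Bool.noConfusion hc⟩
      have hA := pvGoA d m hmc hm1c (num + 2147483650).toNat num d hI (by omega) (by omega)
      rw [hA.1]
      -- B's side
      have hK : num + 1 = m + 1 + (((num - m).toNat : Nat) : Int) := by omega
      rw [hK, pvFoldB d m hmc hm1c (num - m).toNat]
      have hB : (pvFill d m (num - m).toNat).get? num = some (pvFp d m (num - m).toNat).2 := by
        have h := pvFill_get? d m hmc (num - m).toNat (num - m).toNat le_rfl
        rwa [show m + (((num - m).toNat : Nat) : Int) = num by omega] at h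
      rw [PySem.Dict.getD_of_get?_eq_some _ _ hB]
      unfold pvVal
      rw [if_neg (by omega)]

-- ===== VERDICT (by name: the statement is the Claim_ definition above) =====
theorem memoized_fib_spec : Claim_equal_memoized_fib := by
  intro num memo_dict hdom hpre
  unfold Spec_memoized_fib
  exact pv_main num memo_dict hdom hpre
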